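-- pv_equiv track=rewrite | github.com/iriskaplan/coding-challenges | Advent-of-code/2015/day 17.py | count_fit_eggnog
-- ===== SOURCE A (Python) =====
-- def count_fit_eggnog(sub_group):
--     count = dict()
--     for group in sub_group:
--         if sum(group) == 150:
--             n = len(group)
--             if n in count:
--                 count[n] += 1
--             else:
--                 count[n] = 1
--     # for part 2
--     minimal_k, minimal_v = 1000, 1000
--     for n in count:
--         if minimal_k > n:
--             minimal_k = n
--             minimal_v = count[minimal_k]
--     return minimal_v
-- ===== SOURCE B (Python) =====
-- def count_fit_eggnog(sub_group):
--     # pass 1: shortest qualifying length (1000 = none found)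
--     shortest = 1000
--     for group in sub_group:
--         if sum(group) == 150 and len(group) < shortest:
--             shortest = len(group)
--     if shortest == 1000:
--         return 1000
--     # pass 2: how many qualifying groups have that length
--     return sum(1 for group in sub_group
--                if sum(group) == 150 and len(group) == shortest)
-- ===== Notes on version B (the rewrite author's own statement) =====
-- stated objective: simpler
-- what changed: B maintains no length-histogram dict and never scans dict keys: one pass tracks the running minimum qualifying length (1000 meaning none found), and a second pass counts the groups of exactly that length.
import Mathlib
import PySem

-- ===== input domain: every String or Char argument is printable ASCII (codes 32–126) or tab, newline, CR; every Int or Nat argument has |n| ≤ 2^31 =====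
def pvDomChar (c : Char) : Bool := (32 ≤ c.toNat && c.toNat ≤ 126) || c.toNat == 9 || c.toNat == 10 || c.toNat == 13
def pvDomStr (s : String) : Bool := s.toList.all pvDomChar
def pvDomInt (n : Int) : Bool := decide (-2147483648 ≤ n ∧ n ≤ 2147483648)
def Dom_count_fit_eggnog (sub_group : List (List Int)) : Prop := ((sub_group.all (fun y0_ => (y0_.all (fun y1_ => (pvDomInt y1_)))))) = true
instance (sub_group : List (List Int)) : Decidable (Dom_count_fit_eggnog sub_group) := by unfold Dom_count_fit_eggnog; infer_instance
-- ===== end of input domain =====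

-- B keeps no length-histogram dict and no dict-key scan: one pass tracks the
-- running minimum qualifying length (1000 = none found), a second pass counts
-- the groups of that length; same cost, a plainer two-pass decomposition.

-- ===== PORT A =====
def count_fit_eggnog (sub_group : List (List Int)) : Int :=
  let count : PySem.Dict Int Int :=
    sub_group.foldl (fun d group =>
      if group.sum = 150 then
        let n : Int := (group.length : Int)
        if d.contains n then d.modify n 0 (· + 1) else d.insert n 1
      else d) PySem.Dict.empty
  -- Python: count[minimal_k] is read only when minimal_k was just set to a present key, so getD is exact
  let p : Int × Int :=
    count.keys.foldl (fun p n =>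
      if p.1 > n then (n, count.getD n 0) else p) (1000, 1000)
  p.2

-- ===== PORT B =====
def count_fit_eggnog_alt (sub_group : List (List Int)) : Int :=
  let shortest : Int :=
    sub_group.foldl (fun m group =>
      if group.sum == 150 && decide ((group.length : Int) < m) then (group.length : Int) else m)
      1000
  if shortest == 1000 then 1000
  else
    -- sum(1 for group in sub_group if sum(group) == 150 and len(group) == shortest)
    sub_group.foldl (fun c group =>
      if group.sum == 150 && ((group.length : Int) == shortest) then c + 1 else c) (0 : Int)

-- ===== PRECONDITION & SPEC =====
def Spec_count_fit_eggnog (sub_group : List (List Int)) (out : Int) : Prop :=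
  out = count_fit_eggnog_alt sub_group
instance (sub_group : List (List Int)) (out : Int) : Decidable (Spec_count_fit_eggnog sub_group out) := by
  unfold Spec_count_fit_eggnog; infer_instance

-- ===== CLAIM (what is proved, stated in full; the proofs are below) =====
def Claim_equal_count_fit_eggnog : Prop :=
  ∀ (sub_group : List (List Int)), Dom_count_fit_eggnog sub_group →
    Spec_count_fit_eggnog sub_group (count_fit_eggnog sub_group)

-- ===== LEMMAS AND PROOFS =====

-- A's branch body equals the unconditional Counter step
theorem dict_step_eq (d : PySem.Dict Int Int) (n : Int) :
    (if d.contains n then d.modify n 0 (· + 1) else d.insert n 1) = d.modify n 0 (· + 1) := by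
  by_cases h : d.contains n <;>
    simp [h, PySem.Dict.modify, PySem.Dict.insert, PySem.Dict.getD_of_not_contains]

-- a guarded fold over xs is the fold over the filtered-and-mapped list
theorem foldl_guard_filter_map {α β γ : Type} (p : α → Bool) (f : α → β) (g : γ → β → γ) :
    ∀ (xs : List α) (init : γ),
      xs.foldl (fun acc x => if p x then g acc (f x) else acc) init
        = ((xs.filter p).map f).foldl g init := by
  intro xs
  induction xs with
  | nil => intro init; rfl
  | cons x t ih =>
    intro init
    by_cases h : p x <;> simp [h, ih]

-- A's key scan: first component is the running min, second the payload at it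
theorem scan_min (c : Int → Int) :
    ∀ (ks : List Int) (a v : Int),
      ks.foldl (fun p n => if p.1 > n then (n, c n) else p) (a, v)
        = (ks.foldl min a, if ks.foldl min a = a then v else c (ks.foldl min a)) := by
  intro ks
  induction ks with
  | nil => intro a v; simp
  | cons n t ih =>
    intro a v
    by_cases h : a > n
    · have hmin : min a n = n := by omega
      have hle : t.foldl min n ≤ n := (PySem.List.foldl_min_le t n).1
      rw [List.foldl_cons, if_pos (by simpa using h), ih, List.foldl_cons, hmin]
      have hne : ¬ t.foldl min n = a := by omega
      rw [if_neg hne]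
      by_cases he : t.foldl min n = n
      · rw [if_pos he, he]
      · rw [if_neg he]
    · have hmin : min a n = a := by omega
      rw [List.foldl_cons, if_neg (by simpa using h), ih, List.foldl_cons, hmin]

-- foldl min depends only on which elements occur
theorem foldl_min_congr_mem (l₁ l₂ : List Int) (b : Int)
    (h : ∀ x : Int, x ∈ l₁ ↔ x ∈ l₂) :
    l₁.foldl min b = l₂.foldl min b := by
  have h1 := PySem.List.foldl_min_le l₁ b
  have h2 := PySem.List.foldl_min_le l₂ b
  have m1 := PySem.List.foldl_min_mem l₁ b
  have m2 := PySem.List.foldl_min_mem l₂ b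
  apply le_antisymm
  · rcases m2 with hb | hm
    · rw [hb]; exact h1.1
    · exact h1.2 _ ((h _).2 hm)
  · rcases m1 with hb | hm
    · rw [hb]; exact h2.1
    · exact h2.2 _ ((h _).1 hm)

-- B's counting fold is Int-cast count, shifted by the accumulator
theorem foldl_count_eq (s : Int) :
    ∀ (l : List Int) (c : Int),
      l.foldl (fun c n => if n == s then c + 1 else c) c = c + (l.count s : Int) := by
  intro l
  induction l with
  | nil => intro c; simp
  | cons x t ih =>
    intro c
    rw [List.foldl_cons]
    by_cases h : x = s
    · rw [if_pos (by simp [h]), ih (c + 1), List.count_cons, if_pos (by simp [h])]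
      push_cast; omega
    · rw [if_neg (by simp [h]), ih c, List.count_cons, if_neg (by simp [h])]
      simp

theorem count_fit_eggnog_spec : Claim_equal_count_fit_eggnog := by
  unfold Claim_equal_count_fit_eggnog
  intro xs _
  unfold Spec_count_fit_eggnog count_fit_eggnog count_fit_eggnog_alt
  simp only []
  set L : List Int := (xs.filter (fun g => g.sum == 150)).map (fun g => (g.length : Int)) with hL
  -- A's dict is Counter(L)
  have hdict :
      xs.foldl (fun d group =>
        if group.sum = 150 then
          (if d.contains (group.length : Int) then d.modify (group.length : Int) 0 (· + 1)
           else d.insert (group.length : Int) 1)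
        else d) (PySem.Dict.empty : PySem.Dict Int Int)
      = PySem.Dict.counter L := by
    have hfun : (fun (d : PySem.Dict Int Int) (group : List Int) =>
        if group.sum = 150 then
          (if d.contains (group.length : Int) then d.modify (group.length : Int) 0 (· + 1)
           else d.insert (group.length : Int) 1)
        else d)
        = (fun (d : PySem.Dict Int Int) (group : List Int) =>
            if (group.sum == 150 : Bool) then d.modify (group.length : Int) 0 (· + 1) else d) := by
      funext d group
      by_cases h : group.sum = 150 <;> simp [h, dict_step_eq]
    rw [hfun, foldl_guard_filter_map (fun g : List Int => g.sum == 150)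
          (fun g : List Int => (g.length : Int))
          (fun (d : PySem.Dict Int Int) n => d.modify n 0 (· + 1)) xs PySem.Dict.empty,
        ← hL, PySem.Dict.counter_eq_foldl]
  rw [hdict, scan_min]
  simp only [PySem.Dict.getD_counter]
  -- min over the dict keys = min over L
  have hkeys : ((PySem.Dict.counter L).keys).foldl min 1000 = L.foldl min 1000 := by
    apply foldl_min_congr_mem
    intro x
    rw [PySem.Dict.keys_counter]
    exact PySem.Set.mem_ofList L x
  rw [hkeys]
  -- B's first pass is the same running minimum over L
  have hshort :
      xs.foldl (fun m group =>
        if group.sum == 150 && decide ((group.length : Int) < m) then (group.length : Int) else m)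
        1000 = L.foldl min 1000 := by
    have hfun : (fun (m : Int) (group : List Int) =>
        if group.sum == 150 && decide ((group.length : Int) < m) then (group.length : Int) else m)
        = (fun (m : Int) (group : List Int) =>
            if (group.sum == 150 : Bool) then min m (group.length : Int) else m) := by
      funext m group
      by_cases h : group.sum = 150
      · by_cases h2 : (group.length : Int) < m <;> simp [h, h2] <;> omega
      · simp [h]
    rw [hfun, foldl_guard_filter_map (fun g : List Int => g.sum == 150)
          (fun g : List Int => (g.length : Int)) (fun m n => min m n) xs 1000, ← hL]
  rw [hshort]
  set m0 : Int := L.foldl min 1000 with hm0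
  by_cases hc : m0 = 1000
  · simp [hc]
  · rw [if_neg hc, if_neg (by simpa using hc)]
    -- B's second pass counts the occurrences of m0 in L
    have hfun2 : (fun (c : Int) (group : List Int) =>
        if group.sum == 150 && ((group.length : Int) == m0) then c + 1 else c)
        = (fun (c : Int) (group : List Int) =>
            if (group.sum == 150 : Bool) then
              (if (group.length : Int) == m0 then c + 1 else c) else c) := by
      funext c group
      by_cases h : group.sum = 150
      · by_cases h2 : (group.length : Int) = m0 <;> simp [h, h2]
      · simp [h]
    rw [hfun2, foldl_guard_filter_map (fun g : List Int => g.sum == 150)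
          (fun g : List Int => (g.length : Int))
          (fun (c : Int) n => if n == m0 then c + 1 else c) xs 0, ← hL,
        foldl_count_eq m0 L 0]
    omega

-- ===== VERDICT (by name: the statement is the Claim_ definition above) =====
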